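-- pv_equiv track=rewrite | github.com/Adil-MohammedK/ED5340-Lab | Lab4/5.py | DoBoth
-- ===== SOURCE A (Python) =====
-- def DoBoth(Num, str):
--     vowels = 0
--     consonants = 0
--     if Num % 2 == 0:
--         NumStatus = 'Even'
--     else:
--         NumStatus = 'Odd'
--     for i in str:
--         if i.lower() == 'a' or i.lower() == 'e' or i.lower() == 'i' or i.lower() == 'o' or i.lower() == 'u':
--             vowels += 1
--         elif i == ' ':
--             pass
--         else:
--             consonants += 1
--     return NumStatus, vowels, consonants
-- ===== SOURCE B (Python) =====
-- def DoBoth(Num, str):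
--     NumStatus = 'Even' if Num % 2 == 0 else 'Odd'
--     low = str.lower()
--     vowels = sum(low.count(v) for v in 'aeiou')
--     consonants = len(str) - vowels - str.count(' ')
--     return NumStatus, vowels, consonants
-- ===== Notes on version B (the rewrite author's own statement) =====
-- stated objective: faster
-- what changed: Replaces A's single branching per-character loop with independent substring-count scans: parity by a one-line conditional, vowels as a sum of low.count(v) over 'aeiou', consonants by subtraction len(str) - vowels - str.count(' ').
import Mathlib
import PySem

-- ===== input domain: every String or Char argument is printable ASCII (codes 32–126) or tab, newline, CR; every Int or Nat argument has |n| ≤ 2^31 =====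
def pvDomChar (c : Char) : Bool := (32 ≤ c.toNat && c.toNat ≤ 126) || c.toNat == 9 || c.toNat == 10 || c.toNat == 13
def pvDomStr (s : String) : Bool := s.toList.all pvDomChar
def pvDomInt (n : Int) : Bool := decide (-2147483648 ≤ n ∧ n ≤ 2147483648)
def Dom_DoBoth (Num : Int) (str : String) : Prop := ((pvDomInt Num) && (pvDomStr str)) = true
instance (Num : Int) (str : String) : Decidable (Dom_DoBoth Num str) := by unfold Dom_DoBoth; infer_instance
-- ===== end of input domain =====

-- B replaces A's single branching character loop by a one-line parity conditional,
-- five independent substring-count scans for vowels, and consonants by subtraction (objective: simpler).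


-- ===== PORT A =====
def DoBoth (Num : Int) (str : String) : String × Int × Int :=
  let NumStatus := if PySem.Int.mod Num 2 = 0 then "Even" else "Odd"
  let p := str.toList.foldl
    (fun (p : Int × Int) i =>
      if PySem.Chars.lowerChar i = 'a' ∨ PySem.Chars.lowerChar i = 'e' ∨
         PySem.Chars.lowerChar i = 'i' ∨ PySem.Chars.lowerChar i = 'o' ∨
         PySem.Chars.lowerChar i = 'u' then (p.1 + 1, p.2)
      else if i = ' ' then p
      else (p.1, p.2 + 1)) ((0 : Int), (0 : Int))
  (NumStatus, p.1, p.2)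

-- ===== PORT B =====
def DoBoth_alt (Num : Int) (str : String) : String × Int × Int :=
  let NumStatus := if PySem.Int.mod Num 2 = 0 then "Even" else "Odd"
  let low := PySem.Str.lower str
  let vowels : Int :=
    (("aeiou".toList).map (fun v => (PySem.Str.count low (String.ofList [v]) : Int))).sum
  let consonants : Int := PySem.Str.len str - vowels - (PySem.Str.count str " " : Int)
  (NumStatus, vowels, consonants)

-- ===== PRECONDITION & SPEC =====
def Spec_DoBoth (Num : Int) (str : String) (out : String × Int × Int) : Prop := out = DoBoth_alt Num str
instance (Num : Int) (str : String) (out : String × Int × Int) : Decidable (Spec_DoBoth Num str out) := by unfold Spec_DoBoth; infer_instance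

-- ===== CLAIM (what is proved, stated in full; the proofs are below) =====
def Claim_equal_DoBoth : Prop := ∀ (Num : Int) (str : String), Dom_DoBoth Num str → Spec_DoBoth Num str (DoBoth Num str)

-- ===== LEMMAS AND PROOFS =====

-- substring count of a single character equals the character count
theorem count_go_single (c : Char) : ∀ (l : List Char) (fuel acc : Nat), l.length ≤ fuel →
    PySem.Chars.count.go [c] fuel l acc = acc + l.count c := by
  intro l
  induction l with
  | nil =>
    intro fuel acc _
    cases fuel <;> simp [PySem.Chars.count.go]
  | cons h t ih =>
    intro fuel acc hf
    cases fuel with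
    | zero => simp at hf
    | succ n =>
      rw [PySem.Chars.count.go]
      have hfn : t.length ≤ n := by simp only [List.length_cons] at hf; omega
      by_cases hc : c = h
      · subst hc
        simp only [List.isPrefixOf, BEq.rfl, Bool.true_and,
          if_pos, List.drop_succ_cons, List.length_cons, List.length_nil, List.drop_zero]
        rw [ih n (acc + 1) hfn]
        have : (c :: t).count c = t.count c + 1 := by simp
        rw [this]; omega
      · have hpre : ([c].isPrefixOf (h :: t)) = false := by
          simp only [List.isPrefixOf, Bool.and_true,
            beq_eq_false_iff_ne, ne_eq]
          exact hc
        rw [hpre]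
        simp only [Bool.false_eq_true, if_false]
        rw [ih n acc hfn]
        have : (h :: t).count c = t.count c := by
          have hne : (h == c) = false := by
            simp only [beq_eq_false_iff_ne, ne_eq]; exact fun e => hc e.symm
          simp only [List.count_cons, hne, Bool.false_eq_true, if_false, add_zero]
        rw [this]

theorem count_single (l : List Char) (c : Char) :
    PySem.Chars.count l [c] = l.count c := by
  simp only [PySem.Chars.count, List.isEmpty_cons, Bool.false_eq_true, if_false]
  simpa using count_go_single c l l.length 0 le_rfl

-- the vowel predicate A tests
def vowP (i : Char) : Bool :=
  decide (PySem.Chars.lowerChar i = 'a' ∨ PySem.Chars.lowerChar i = 'e' ∨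
    PySem.Chars.lowerChar i = 'i' ∨ PySem.Chars.lowerChar i = 'o' ∨ PySem.Chars.lowerChar i = 'u')

-- A's loop in closed form
theorem foldA (cs : List Char) : ∀ (v c : Int),
    cs.foldl
      (fun (p : Int × Int) i =>
        if PySem.Chars.lowerChar i = 'a' ∨ PySem.Chars.lowerChar i = 'e' ∨
           PySem.Chars.lowerChar i = 'i' ∨ PySem.Chars.lowerChar i = 'o' ∨
           PySem.Chars.lowerChar i = 'u' then (p.1 + 1, p.2)
        else if i = ' ' then p
        else (p.1, p.2 + 1)) (v, c)
    = (v + cs.countP vowP, c + cs.countP (fun i => !vowP i && i != ' ')) := by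
  induction cs with
  | nil => intro v c; simp
  | cons h t ih =>
    intro v c
    simp only [List.foldl_cons, List.countP_cons]
    by_cases hv : vowP h = true
    · have hv' : PySem.Chars.lowerChar h = 'a' ∨ PySem.Chars.lowerChar h = 'e' ∨
          PySem.Chars.lowerChar h = 'i' ∨ PySem.Chars.lowerChar h = 'o' ∨
          PySem.Chars.lowerChar h = 'u' := by simpa [vowP] using hv
      rw [if_pos hv', ih]
      simp [hv, Prod.ext_iff]
      omega
    · have hv' : ¬ (PySem.Chars.lowerChar h = 'a' ∨ PySem.Chars.lowerChar h = 'e' ∨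
          PySem.Chars.lowerChar h = 'i' ∨ PySem.Chars.lowerChar h = 'o' ∨
          PySem.Chars.lowerChar h = 'u') := by simpa [vowP] using hv
      rw [if_neg hv']
      by_cases hs : h = ' '
      · rw [if_pos hs, ih]
        simp [hs]
      · rw [if_neg hs, ih]
        have hb : (!vowP h && h != ' ') = true := by simp [hv, hs]
        simp [hv, hs, Prod.ext_iff]
        omega

-- B's vowel sum counts exactly A's vowels
theorem vow_sum (cs : List Char) :
    (("aeiou".toList).map
      (fun v => ((PySem.Chars.lower cs).count v : Int))).sum = (cs.countP vowP : Int) := by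
  have expand : ("aeiou".toList) = ['a', 'e', 'i', 'o', 'u'] := by decide
  rw [expand]
  simp only [List.map_cons, List.map_nil, List.sum_cons, List.sum_nil, add_zero,
    PySem.Chars.lower]
  induction cs with
  | nil => simp
  | cons h t ih =>
    simp only [List.map_cons, List.count_cons, List.countP_cons]
    by_cases hv : vowP h = true
    · have hv' : PySem.Chars.lowerChar h = 'a' ∨ PySem.Chars.lowerChar h = 'e' ∨
          PySem.Chars.lowerChar h = 'i' ∨ PySem.Chars.lowerChar h = 'o' ∨
          PySem.Chars.lowerChar h = 'u' := by simpa [vowP] using hv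
      rcases hv' with e | e | e | e | e <;> rw [e] <;> simp [hv] <;> omega
    · have hv' : ¬ (PySem.Chars.lowerChar h = 'a' ∨ PySem.Chars.lowerChar h = 'e' ∨
          PySem.Chars.lowerChar h = 'i' ∨ PySem.Chars.lowerChar h = 'o' ∨
          PySem.Chars.lowerChar h = 'u') := by simpa [vowP] using hv
      rw [not_or, not_or, not_or, not_or] at hv'
      obtain ⟨h1, h2, h3, h4, h5⟩ := hv'
      have n1 : (PySem.Chars.lowerChar h == 'a') = false := by
        simp only [beq_eq_false_iff_ne, ne_eq]; exact h1
      have n2 : (PySem.Chars.lowerChar h == 'e') = false := by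
        simp only [beq_eq_false_iff_ne, ne_eq]; exact h2
      have n3 : (PySem.Chars.lowerChar h == 'i') = false := by
        simp only [beq_eq_false_iff_ne, ne_eq]; exact h3
      have n4 : (PySem.Chars.lowerChar h == 'o') = false := by
        simp only [beq_eq_false_iff_ne, ne_eq]; exact h4
      have n5 : (PySem.Chars.lowerChar h == 'u') = false := by
        simp only [beq_eq_false_iff_ne, ne_eq]; exact h5
      simp only [n1, n2, n3, n4, n5, hv, Bool.false_eq_true, if_false, add_zero]
      exact ih

-- consonants-by-subtraction equals A's consonant count
theorem cons_sub (cs : List Char) :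
    (cs.length : Int) - (cs.countP vowP : Int) - (cs.count ' ' : Int)
      = (cs.countP (fun i => !vowP i && i != ' ') : Int) := by
  have key : cs.countP vowP + cs.count ' ' + cs.countP (fun i => !vowP i && i != ' ')
      = cs.length := by
    induction cs with
    | nil => simp
    | cons h t ih =>
      simp only [List.countP_cons, List.count_cons, List.length_cons]
      by_cases hv : vowP h = true
      · have hne : (' ' == h) = false := by
          simp only [beq_eq_false_iff_ne, ne_eq]
          intro e; rw [← e] at hv; revert hv; decide
        have hne' : (h == ' ') = false := by
          simp only [beq_eq_false_iff_ne, ne_eq]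
          intro e; rw [e] at hv; revert hv; decide
        simp [hv, hne']
        omega
      · by_cases hs : h = ' '
        · have hvs : vowP ' ' = false := by decide
          simp [hs, hvs]
          omega
        · have hb : (!vowP h && h != ' ') = true := by simp [hv, hs]
          simp [hv, hs]
          omega
  omega

-- ===== VERDICT (by name: the statement is the Claim_ definition above) =====
theorem DoBoth_spec : Claim_equal_DoBoth := by
  intro Num str _
  unfold Spec_DoBoth DoBoth DoBoth_alt
  simp only [foldA str.toList 0 0, zero_add]
  have hc : ∀ v : Char, PySem.Str.count (PySem.Str.lower str) (String.ofList [v])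
      = (PySem.Chars.lower str.toList).count v := by
    intro v
    rw [PySem.Str.count_eq]
    have h1 : (PySem.Str.lower str).toList = PySem.Chars.lower str.toList := by
      simp [PySem.Str.lower]
    have h2 : (String.ofList [v]).toList = [v] := by simp
    rw [h1, h2, count_single]
  have hv : (("aeiou".toList).map
      (fun v => ((PySem.Str.count (PySem.Str.lower str) (String.ofList [v])) : Int))).sum
      = (str.toList.countP vowP : Int) := by
    rw [show (("aeiou".toList).map
        (fun v => ((PySem.Str.count (PySem.Str.lower str) (String.ofList [v])) : Int)))
        = (("aeiou".toList).map (fun v => (((PySem.Chars.lower str.toList).count v) : Int)))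
      from List.map_congr_left (fun v _ => by rw [hc v])]
    exact vow_sum str.toList
  have hsp : PySem.Str.count str " " = str.toList.count ' ' := by
    rw [PySem.Str.count_eq]
    have h3 : (" " : String).toList = [' '] := by decide
    rw [h3, count_single]
  have hlen : PySem.Str.len str = (str.toList.length : Int) := by
    simp [PySem.Str.len_eq]
  refine Prod.ext rfl (Prod.ext ?_ ?_) <;> simp only [hv, hsp, hlen]
  exact (cons_sub str.toList).symm
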